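-- pv_equiv track=rewrite | github.com/JrJessyLuo/SemiBonsai | codes/utils/basic_utils.py | build_union_meta_for_raw
-- ===== SOURCE A (Python) =====
-- from typing import List, Dict, Any, Iterable, Optional
--
-- def build_union_meta_for_raw(raw_id: str, raw2subtab: Dict[str, List[str]], table_meta_infos: Dict[str, List[Dict[str, Any]]]):
--     """
--     Union metadata across ALL subtables under a raw table.
--     Output format matches prompt input:
--       {"subtable_titles":[...], "column_headers":[...], "row_headers":[...]}
--     """
--     sub_ids = raw2subtab.get(raw_id, []) or []
--
--     titles, cols, rows = [], [], []
--
--     def push_unique(lst, x):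
--         if x is None:
--             return
--         s = str(x).strip()
--         if not s:
--             return
--         if s not in lst:
--             lst.append(s)
--
--     for sid in sub_ids:
--         if sid not in table_meta_infos:
--             continue
--         item = table_meta_infos[sid][0]
--         for t in item.get("subtable_titles", []):
--             push_unique(titles, t)
--         for c in item.get("column_headers", []):
--             push_unique(cols, c)
--         for r in item.get("row_headers", []):
--             push_unique(rows, r)
--
--     return {"subtable_titles": titles, "column_headers": cols, "row_headers": rows}
-- ===== SOURCE B (Python) =====
-- def build_union_meta_for_raw(raw_id, raw2subtab, table_meta_infos):
--     sub_ids = raw2subtab.get(raw_id, []) or []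
--
--     def collect(key):
--         raw = []
--         for sid in sub_ids:
--             if sid not in table_meta_infos:
--                 continue
--             item = table_meta_infos[sid][0]
--             for x in item.get(key, []):
--                 if x is None:
--                     continue
--                 s = str(x).strip()
--                 if s:
--                     raw.append(s)
--         return raw
--
--     return {key: list(dict.fromkeys(collect(key)))
--             for key in ("subtable_titles", "column_headers", "row_headers")}
-- ===== Notes on version B (the rewrite author's own statement) =====
-- stated objective: simpler
-- what changed: A interleaves collection and dedup in one pass over subtables via a membership-checking push_unique into three parallel accumulators; B first collects a flat list of normalized non-empty strings per key with a single helper and then dedups each list once with dict.fromkeys.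
import Mathlib
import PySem

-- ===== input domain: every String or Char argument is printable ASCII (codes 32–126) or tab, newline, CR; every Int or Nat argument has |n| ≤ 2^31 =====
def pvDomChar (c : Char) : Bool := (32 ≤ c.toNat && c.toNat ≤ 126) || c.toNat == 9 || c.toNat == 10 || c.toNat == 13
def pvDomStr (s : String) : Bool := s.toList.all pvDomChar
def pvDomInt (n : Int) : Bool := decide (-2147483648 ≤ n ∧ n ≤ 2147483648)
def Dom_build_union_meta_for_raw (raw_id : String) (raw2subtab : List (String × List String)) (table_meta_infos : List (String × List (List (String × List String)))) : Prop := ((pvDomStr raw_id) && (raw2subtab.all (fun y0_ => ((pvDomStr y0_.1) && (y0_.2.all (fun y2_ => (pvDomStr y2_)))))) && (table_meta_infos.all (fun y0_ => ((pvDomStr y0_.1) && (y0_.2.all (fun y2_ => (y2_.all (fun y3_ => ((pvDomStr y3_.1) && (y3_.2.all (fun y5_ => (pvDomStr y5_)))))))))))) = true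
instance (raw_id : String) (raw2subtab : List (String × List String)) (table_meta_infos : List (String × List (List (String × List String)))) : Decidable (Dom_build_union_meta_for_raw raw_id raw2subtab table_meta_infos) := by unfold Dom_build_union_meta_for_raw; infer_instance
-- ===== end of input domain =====

-- B replaces A's interleaved per-subtable dedup with a two-phase decomposition: one helper collects all
-- normalized non-empty strings per key across the subtables, then each flat list is deduped once with
-- dict.fromkeys (objective: simpler decomposition; same cost).

-- ===== PORT A =====
-- push_unique(lst, x): x is a string here, so the 'x is None' guard never fires and str(x) = x
def pvPushUnique (lst : List String) (x : String) : List String :=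
  let s := PySem.Str.strip x
  if s = "" then lst
  else if s ∈ lst then lst else lst ++ [s]

def build_union_meta_for_raw (raw_id : String) (raw2subtab : List (String × List String)) (table_meta_infos : List (String × List (List (String × List String)))) : List (String × List String) :=
  let sub_ids := (raw2subtab.lookup raw_id).getD []
  let st := sub_ids.foldl (fun (st : List String × List String × List String) sid =>
    match table_meta_infos.lookup sid with
    | none => st
    | some l =>
      let item := PySem.List.pyGetD l 0 []   -- table_meta_infos[sid][0]; Pre_ keeps these lists nonempty
      let titles := ((item.lookup "subtable_titles").getD []).foldl pvPushUnique st.1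
      let cols := ((item.lookup "column_headers").getD []).foldl pvPushUnique st.2.1
      let rows := ((item.lookup "row_headers").getD []).foldl pvPushUnique st.2.2
      (titles, cols, rows)) ([], [], [])
  [("subtable_titles", st.1), ("column_headers", st.2.1), ("row_headers", st.2.2)]

-- ===== PORT B =====
-- collect(key): flat list of normalized non-empty strings for one key across all valid subtables
def pvCollect (key : String) (sub_ids : List String) (table_meta_infos : List (String × List (List (String × List String)))) : List String :=
  sub_ids.foldl (fun acc sid =>
    match table_meta_infos.lookup sid with
    | none => acc
    | some l =>
      (((PySem.List.pyGetD l 0 []).lookup key).getD []).foldl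
        (fun acc x => let s := PySem.Str.strip x; if s = "" then acc else acc ++ [s]) acc) []

def build_union_meta_for_raw_alt (raw_id : String) (raw2subtab : List (String × List String)) (table_meta_infos : List (String × List (List (String × List String)))) : List (String × List String) :=
  let sub_ids := (raw2subtab.lookup raw_id).getD []
  [("subtable_titles", PySem.List.dedup (pvCollect "subtable_titles" sub_ids table_meta_infos)),
   ("column_headers", PySem.List.dedup (pvCollect "column_headers" sub_ids table_meta_infos)),
   ("row_headers", PySem.List.dedup (pvCollect "row_headers" sub_ids table_meta_infos))]

-- ===== PRECONDITION & SPEC =====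
-- Pre_ excludes only inputs where A raises IndexError: a selected subtable id mapped to an EMPTY list,
-- on which table_meta_infos[sid][0] fails.
def Pre_build_union_meta_for_raw (raw_id : String) (raw2subtab : List (String × List String)) (table_meta_infos : List (String × List (List (String × List String)))) : Prop :=
  ∀ sid ∈ (raw2subtab.lookup raw_id).getD [], (table_meta_infos.lookup sid).getD [[]] ≠ []
instance (raw_id : String) (raw2subtab : List (String × List String)) (table_meta_infos : List (String × List (List (String × List String)))) : Decidable (Pre_build_union_meta_for_raw raw_id raw2subtab table_meta_infos) := by unfold Pre_build_union_meta_for_raw; infer_instance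

def pvWitness_build_union_meta_for_raw : String × (List (String × List String)) × (List (String × List (List (String × List String)))) :=
  ("r", [("r", ["s1", "s2"])], [("s1", [[("subtable_titles", [" T ", "T"]), ("column_headers", ["c", ""])]])])

def Spec_build_union_meta_for_raw (raw_id : String) (raw2subtab : List (String × List String)) (table_meta_infos : List (String × List (List (String × List String)))) (out : List (String × List String)) : Prop := out = build_union_meta_for_raw_alt raw_id raw2subtab table_meta_infos
instance (raw_id : String) (raw2subtab : List (String × List String)) (table_meta_infos : List (String × List (List (String × List String)))) (out : List (String × List String)) : Decidable (Spec_build_union_meta_for_raw raw_id raw2subtab table_meta_infos out) := by unfold Spec_build_union_meta_for_raw; infer_instance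

-- ===== CLAIM (what is proved, stated in full; the proofs are below) =====
def Claim_equal_build_union_meta_for_raw : Prop := ∀ (raw_id : String) (raw2subtab : List (String × List String)) (table_meta_infos : List (String × List (List (String × List String)))), Dom_build_union_meta_for_raw raw_id raw2subtab table_meta_infos → Pre_build_union_meta_for_raw raw_id raw2subtab table_meta_infos → Spec_build_union_meta_for_raw raw_id raw2subtab table_meta_infos (build_union_meta_for_raw raw_id raw2subtab table_meta_infos)

-- ===== LEMMAS AND PROOFS =====

-- normalization step shared by both programs: strip, drop if empty
def pvNorm (x : String) : Option String :=
  let s := PySem.Str.strip x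
  if s = "" then none else some s

-- the per-key contribution of one subtable id, already normalized
def pvKeyOf (table_meta_infos : List (String × List (List (String × List String)))) (key : String) (sid : String) : List String :=
  match table_meta_infos.lookup sid with
  | none => []
  | some l => (((PySem.List.pyGetD l 0 []).lookup key).getD []).filterMap pvNorm

-- proof-only names for the two loop bodies (definitionally the lambdas in the ports)
def pvStepA (table_meta_infos : List (String × List (List (String × List String)))) (st : List String × List String × List String) (sid : String) : List String × List String × List String :=
  match table_meta_infos.lookup sid with
  | none => st
  | some l =>
    let item := PySem.List.pyGetD l 0 []
    let titles := ((item.lookup "subtable_titles").getD []).foldl pvPushUnique st.1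
    let cols := ((item.lookup "column_headers").getD []).foldl pvPushUnique st.2.1
    let rows := ((item.lookup "row_headers").getD []).foldl pvPushUnique st.2.2
    (titles, cols, rows)

def pvStepB (key : String) (table_meta_infos : List (String × List (List (String × List String)))) (acc : List String) (sid : String) : List String :=
  match table_meta_infos.lookup sid with
  | none => acc
  | some l =>
    (((PySem.List.pyGetD l 0 []).lookup key).getD []).foldl
      (fun acc x => let s := PySem.Str.strip x; if s = "" then acc else acc ++ [s]) acc

theorem pvPushUnique_foldl (xs : List String) (acc : List String) :
    xs.foldl pvPushUnique acc = PySem.Set.update acc (xs.filterMap pvNorm) := by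
  induction xs generalizing acc with
  | nil => simp [PySem.Set.update]
  | cons x xs ih =>
    rw [List.foldl_cons]
    by_cases h : PySem.Str.strip x = ""
    · have hx : pvPushUnique acc x = acc := by simp [pvPushUnique, h]
      have hn : pvNorm x = none := by simp [pvNorm, h]
      rw [hx, List.filterMap_cons, hn, ih]
    · have hx : pvPushUnique acc x = PySem.Set.add acc (PySem.Str.strip x) := by
        simp [pvPushUnique, h, PySem.Set.add_eq_ite]
      have hn : pvNorm x = some (PySem.Str.strip x) := by simp [pvNorm, h]
      rw [hx, List.filterMap_cons, hn, PySem.Set.update_cons, ih]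

theorem pvAppend_foldl (xs : List String) (acc : List String) :
    xs.foldl (fun acc x => let s := PySem.Str.strip x; if s = "" then acc else acc ++ [s]) acc
      = acc ++ xs.filterMap pvNorm := by
  induction xs generalizing acc with
  | nil => simp
  | cons x xs ih =>
    by_cases h : PySem.Str.strip x = ""
    · simp [pvNorm, h, ih]
    · simp [pvNorm, h, ih]

theorem pvA_char (table_meta_infos : List (String × List (List (String × List String)))) (sub_ids : List String) (t c r : List String) :
    sub_ids.foldl (pvStepA table_meta_infos) (t, c, r)
      = (PySem.Set.update t (sub_ids.flatMap (pvKeyOf table_meta_infos "subtable_titles")),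
       PySem.Set.update c (sub_ids.flatMap (pvKeyOf table_meta_infos "column_headers")),
       PySem.Set.update r (sub_ids.flatMap (pvKeyOf table_meta_infos "row_headers"))) := by
  induction sub_ids generalizing t c r with
  | nil => simp [PySem.Set.update]
  | cons sid rest ih =>
    rw [List.foldl_cons]
    cases h : table_meta_infos.lookup sid with
    | none =>
      have hstep : pvStepA table_meta_infos (t, c, r) sid = (t, c, r) := by simp [pvStepA, h]
      rw [hstep, ih]
      simp [pvKeyOf, h]
    | some l =>
      have hstep : pvStepA table_meta_infos (t, c, r) sid
          = (PySem.Set.update t (pvKeyOf table_meta_infos "subtable_titles" sid),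
             PySem.Set.update c (pvKeyOf table_meta_infos "column_headers" sid),
             PySem.Set.update r (pvKeyOf table_meta_infos "row_headers" sid)) := by
        simp [pvStepA, h, pvPushUnique_foldl, pvKeyOf]
      rw [hstep, ih]
      simp [PySem.Set.update_append]

theorem pvB_char (key : String) (table_meta_infos : List (String × List (List (String × List String)))) (sub_ids : List String) :
    pvCollect key sub_ids table_meta_infos = sub_ids.flatMap (pvKeyOf table_meta_infos key) := by
  suffices h : ∀ acc, sub_ids.foldl (pvStepB key table_meta_infos) acc
      = acc ++ sub_ids.flatMap (pvKeyOf table_meta_infos key) by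
    simpa using h []
  induction sub_ids with
  | nil => simp
  | cons sid rest ih =>
    intro acc
    rw [List.foldl_cons]
    cases h : table_meta_infos.lookup sid with
    | none =>
      have hstep : pvStepB key table_meta_infos acc sid = acc := by simp [pvStepB, h]
      rw [hstep, ih]
      simp [pvKeyOf, h]
    | some l =>
      have hstep : pvStepB key table_meta_infos acc sid = acc ++ pvKeyOf table_meta_infos key sid := by
        simp [pvStepB, h, pvAppend_foldl, pvKeyOf]
      rw [hstep, ih]
      simp

-- ===== VERDICT (by name: the statement is the Claim_ definition above) =====
theorem build_union_meta_for_raw_spec : Claim_equal_build_union_meta_for_raw := by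
  intro raw_id raw2subtab table_meta_infos _ _
  unfold Spec_build_union_meta_for_raw
  have hA : build_union_meta_for_raw raw_id raw2subtab table_meta_infos
      = (let st := List.foldl (pvStepA table_meta_infos) ([], [], []) ((raw2subtab.lookup raw_id).getD []);
         [("subtable_titles", st.1), ("column_headers", st.2.1), ("row_headers", st.2.2)]) := rfl
  rw [hA, pvA_char]
  simp only [build_union_meta_for_raw_alt, pvB_char, PySem.List.dedup_eq_ofList,
    ← PySem.Set.update_nil_left]
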